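-- pv_equiv track=rewrite | github.com/absoluteunit1/HackerRank | algorithms/implementation/jumping_on_clouds_revisited.py | jumping_on_clouds
-- ===== SOURCE A (Python) =====
-- def jumping_on_clouds(c, k):
--     n = len(c)
--     e = 99
--     if c[0] == 1:
--         e -= 2
--     nextCloud = (0 + k)%n
--     while nextCloud != 0:
--         if c[nextCloud] == 1:
--             e -= 2
--         e -= 1
--         nextCloud = (nextCloud + k)%n
--     return e
-- ===== SOURCE B (Python) =====
-- def jumping_on_clouds(c, k):
--     n = len(c)
--     g, b = n, k
--     while b:
--         g, b = b, g % b
--     g = abs(g)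
--     m = n // g
--     thunder = sum(1 for i in range(0, n, g) if c[i] == 1)
--     return 100 - m - 2 * thunder
-- ===== Notes on version B (the rewrite author's own statement) =====
-- stated objective: faster
-- what changed: Replaces A's step-by-k simulation of the walk around the cloud cycle with a closed form: g = gcd(n, k) gives the jump count m = n // g, and thunderheads are counted in one strided pass over the orbit's canonical representatives range(0, n, g) instead of visiting positions in walk order.
import Mathlib
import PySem

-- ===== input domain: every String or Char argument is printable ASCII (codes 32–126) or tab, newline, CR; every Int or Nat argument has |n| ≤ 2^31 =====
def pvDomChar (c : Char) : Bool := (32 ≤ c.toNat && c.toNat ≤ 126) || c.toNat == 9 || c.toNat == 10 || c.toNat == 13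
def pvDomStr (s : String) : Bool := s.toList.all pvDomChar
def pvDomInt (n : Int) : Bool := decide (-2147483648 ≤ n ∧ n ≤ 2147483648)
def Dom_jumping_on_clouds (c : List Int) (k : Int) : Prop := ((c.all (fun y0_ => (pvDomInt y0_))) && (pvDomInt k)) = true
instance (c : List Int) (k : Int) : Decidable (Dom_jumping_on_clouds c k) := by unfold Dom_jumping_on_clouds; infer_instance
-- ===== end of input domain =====

-- B replaces A's step-by-k walk around the cycle with a gcd-derived jump count (m = n / gcd(n, k))
-- and a single strided pass over the orbit's canonical representatives 0, g, 2g, …  (objective: alternative).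

-- ===== PORT A =====
-- A's while-loop as fuel recursion; fuel = len(c) always suffices on Pre_ (the walk returns to cloud 0 within len(c) jumps)
def jumpLoopA (c : List Int) (k n : Int) : Nat → Int → Int → Int
  | 0, e, _ => e
  | fuel+1, e, nextCloud =>
    if nextCloud = 0 then e
    else
      let e1 := if PySem.List.pyGetD c nextCloud 0 = 1 then e - 2 else e
      jumpLoopA c k n fuel (e1 - 1) (PySem.Int.mod (nextCloud + k) n)

def jumping_on_clouds (c : List Int) (k : Int) : Int :=
  let n : Int := c.length
  let e : Int := 99
  let e := if PySem.List.pyGetD c 0 0 = 1 then e - 2 else e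
  jumpLoopA c k n c.length e (PySem.Int.mod (0 + k) n)

-- ===== PORT B =====
-- Source B's Euclid loop (while b: g, b = b, g % b) as fuel recursion; fuel = |k|+1 always suffices
def gcdLoopB : Nat → Int → Int → Int
  | 0, g, _ => g
  | fuel+1, g, b => if b = 0 then g else gcdLoopB fuel b (PySem.Int.mod g b)

def jumping_on_clouds_alt (c : List Int) (k : Int) : Int :=
  let n : Int := c.length
  let g := |gcdLoopB (k.natAbs + 1) n k|
  let m := PySem.Int.floordiv n g
  let thunder := (PySem.List.pyRange 0 n g).foldl
    (fun acc i => if PySem.List.pyGetD c i 0 = 1 then acc + 1 else acc) (0 : Int)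
  100 - m - 2 * thunder

-- ===== PRECONDITION & SPEC =====
-- Pre_ excludes only the empty list, on which A raises IndexError at c[0].
def Pre_jumping_on_clouds (c : List Int) (k : Int) : Prop := c ≠ []
instance (c : List Int) (k : Int) : Decidable (Pre_jumping_on_clouds c k) := by unfold Pre_jumping_on_clouds; infer_instance
def pvWitness_jumping_on_clouds : List Int × Int := ([0, 1, 0, 1], 2)

def Spec_jumping_on_clouds (c : List Int) (k : Int) (out : Int) : Prop := out = jumping_on_clouds_alt c k
instance (c : List Int) (k : Int) (out : Int) : Decidable (Spec_jumping_on_clouds c k out) := by unfold Spec_jumping_on_clouds; infer_instance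

-- ===== CLAIM (what is proved, stated in full; the proofs are below) =====
def Claim_equal_jumping_on_clouds : Prop := ∀ (c : List Int) (k : Int), Dom_jumping_on_clouds c k → Pre_jumping_on_clouds c k → Spec_jumping_on_clouds c k (jumping_on_clouds c k)

-- ===== LEMMAS AND PROOFS =====

-- pvPos N R t: position of the walk after t jumps (all positions are multiples of gcd N R);
-- pvCost c p: energy spent entering cloud p
def pvPos (N R t : Nat) : Nat := (t * R) % N
def pvCost (c : List Int) (p : Nat) : Int := (if c.getD p 0 = 1 then 2 else 0) + 1

lemma nt_M_dvd {N R : Nat} (hN : 0 < N) {i : Nat} (h : N ∣ i * R) : (N / N.gcd R) ∣ i := by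
  set G := N.gcd R with hG
  have hGpos : 0 < G := Nat.gcd_pos_of_pos_left R hN
  have hGN : G ∣ N := Nat.gcd_dvd_left N R
  have hGR : G ∣ R := Nat.gcd_dvd_right N R
  have hNe : N = (N / G) * G := (Nat.div_mul_cancel hGN).symm
  have hRe : R = (R / G) * G := (Nat.div_mul_cancel hGR).symm
  have h2 : (N / G) * G ∣ i * ((R / G) * G) := by rw [← hNe, ← hRe]; exact h
  have h3 : (N / G) ∣ i * (R / G) := by
    rw [← mul_assoc] at h2
    exact (Nat.mul_dvd_mul_iff_right hGpos).mp h2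
  have hcop : Nat.Coprime (N / G) (R / G) := Nat.coprime_div_gcd_div_gcd hGpos
  exact (Nat.Coprime.dvd_of_dvd_mul_right hcop) h3

lemma nt_N_dvd_MR {N R : Nat} (hN : 0 < N) : N ∣ (N / N.gcd R) * R := by
  set G := N.gcd R with hG
  obtain ⟨r', hr⟩ : G ∣ R := Nat.gcd_dvd_right N R
  obtain ⟨n', hn⟩ : G ∣ N := Nat.gcd_dvd_left N R
  have hGpos : 0 < G := Nat.gcd_pos_of_pos_left R hN
  have hdiv : N / G = n' := by rw [hn]; exact Nat.mul_div_cancel_left n' hGpos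
  refine ⟨r', ?_⟩
  rw [hdiv, hr, hn]; ring

lemma nt_pos_M {N R : Nat} (hN : 0 < N) : pvPos N R (N / N.gcd R) = 0 := by
  unfold pvPos
  exact Nat.dvd_iff_mod_eq_zero.mp (nt_N_dvd_MR hN)

lemma nt_pos_ne_zero {N R : Nat} (hN : 0 < N) {i : Nat} (h1 : 1 ≤ i) (h2 : i < N / N.gcd R) :
    pvPos N R i ≠ 0 := by
  unfold pvPos
  intro h
  have hdvd : N ∣ i * R := Nat.dvd_iff_mod_eq_zero.mpr h
  have := Nat.le_of_dvd (by omega) (nt_M_dvd hN hdvd)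
  omega

lemma nt_inj_le {N R : Nat} (hN : 0 < N) {i j : Nat} (hle : i ≤ j)
    (hj : j < N / N.gcd R) (h : pvPos N R i = pvPos N R j) : i = j := by
  unfold pvPos at h
  have hmeq : i * R ≡ j * R [MOD N] := h
  have hdvd' : (N : Int) ∣ (j * R : Nat) - (i * R : Nat) := hmeq.dvd
  have hdvdn : N ∣ (j - i) * R := by
    have hmul : i * R ≤ j * R := Nat.mul_le_mul_right R hle
    have : ((j - i) * R : Nat) = ((j * R : Nat) : Int) - ((i * R : Nat) : Int) := by
      push_cast [Nat.sub_mul]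
      omega
    exact_mod_cast this ▸ hdvd'
  have hMd := nt_M_dvd hN hdvdn
  have := Nat.eq_zero_of_dvd_of_lt hMd (by omega)
  omega

lemma nt_inj {N R : Nat} (hN : 0 < N) {i j : Nat}
    (hi : i < N / N.gcd R) (hj : j < N / N.gcd R) (h : pvPos N R i = pvPos N R j) : i = j := by
  rcases Nat.le_total i j with hle | hle
  · exact nt_inj_le hN hle hj h
  · exact (nt_inj_le hN hle hi h.symm).symm

lemma nt_perm {N R : Nat} (hN : 0 < N) :
    ((List.range (N / N.gcd R)).map (pvPos N R)).Perm
      ((List.range (N / N.gcd R)).map (fun j => j * N.gcd R)) := by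
  set G := N.gcd R with hG
  set M := N / G with hM
  have hGpos : 0 < G := Nat.gcd_pos_of_pos_left R hN
  have hNMG : M * G = N := Nat.div_mul_cancel (Nat.gcd_dvd_left N R)
  have hnd1 : ((List.range M).map (pvPos N R)).Nodup := by
    refine (List.nodup_range).map_on ?_
    intro i hi j hj hij
    exact nt_inj hN (List.mem_range.mp hi) (List.mem_range.mp hj) hij
  have hnd2 : ((List.range M).map (fun j => j * G)).Nodup := by
    refine (List.nodup_range).map_on ?_
    intro i _ j _ hij
    exact Nat.eq_of_mul_eq_mul_right hGpos hij
  have hsub : ((List.range M).map (pvPos N R)) ⊆ ((List.range M).map (fun j => j * G)) := by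
    intro x hx
    obtain ⟨t, _, rfl⟩ := List.mem_map.mp hx
    have hdG : G ∣ pvPos N R t := by
      unfold pvPos
      exact (Nat.dvd_mod_iff (Nat.gcd_dvd_left N R)).mpr
        (Dvd.dvd.mul_left (Nat.gcd_dvd_right N R) t)
    have hlt : pvPos N R t < N := Nat.mod_lt _ hN
    obtain ⟨j, hj⟩ := hdG
    refine List.mem_map.mpr ⟨j, List.mem_range.mpr ?_, ?_⟩
    · by_contra hge
      have h1 : M ≤ j := by omega
      have h2 : M * G ≤ j * G := Nat.mul_le_mul_right G h1
      have h3 : G * j = j * G := Nat.mul_comm G j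
      omega
    · rw [hj, Nat.mul_comm]
  have hfin : ((List.range M).map (pvPos N R)).toFinset = ((List.range M).map (fun j => j * G)).toFinset := by
    apply Finset.eq_of_subset_of_card_le
    · intro x hx
      exact List.mem_toFinset.mpr (hsub (List.mem_toFinset.mp hx))
    · rw [List.toFinset_card_of_nodup hnd1, List.toFinset_card_of_nodup hnd2]
      simp
  exact List.perm_of_nodup_nodup_toFinset_eq hnd1 hnd2 hfin

lemma nt_step {N R : Nat} (k : Int) (hN : 0 < N) (hR : (R : Int) = k % (N : Int)) (i : Nat) :
    PySem.Int.mod (((pvPos N R i : Nat) : Int) + k) (N : Int) = ((pvPos N R (i+1) : Nat) : Int) := by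
  have hNpos : (0:Int) < N := by exact_mod_cast hN
  rw [PySem.Int.mod_eq_emod_of_pos hNpos]
  unfold pvPos
  have h1 : ((i * R % N : Nat) : Int) = ((i:Int) * R) % N := by push_cast; rfl
  have h2 : (((i+1) * R % N : Nat) : Int) = (((i:Int)+1) * R) % N := by push_cast; rfl
  rw [h1, h2, Int.emod_add_emod]
  have hRlt : (R:Int) < N := hR ▸ Int.emod_lt_of_pos k hNpos
  have hk : k ≡ (R:Int) [ZMOD (N:Int)] := by
    unfold Int.ModEq
    rw [← hR]
    exact (Int.emod_eq_of_lt (by positivity) hRlt).symm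
  have : ((i:Int) * R + k) ≡ ((i:Int) * R + R) [ZMOD (N:Int)] := Int.ModEq.add_left _ hk
  calc ((i:Int) * R + k) % N = ((i:Int) * R + R) % N := this
    _ = (((i:Int)+1) * R) % N := by ring_nf

lemma jumpLoopA_char (c : List Int) (k : Int) {R : Nat} (hN : 0 < c.length)
    (hR : (R : Int) = k % (c.length : Int)) :
    ∀ (d i : Nat), i + d = c.length / (c.length.gcd R) → 1 ≤ i →
    ∀ fuel, d < fuel → ∀ e : Int,
    jumpLoopA c k (c.length : Int) fuel e ((pvPos c.length R i : Nat) : Int)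
      = e - ((List.range d).map (fun t => pvCost c (pvPos c.length R (i + t)))).sum := by
  intro d
  induction d with
  | zero =>
    intro i hiM _ fuel hfuel e
    obtain ⟨f, rfl⟩ : ∃ f, fuel = f + 1 := ⟨fuel - 1, by omega⟩
    have hpos : pvPos c.length R i = 0 := by
      rw [show i = c.length / (c.length.gcd R) by omega]
      exact nt_pos_M hN
    rw [hpos]
    simp [jumpLoopA]
  | succ d ih =>
    intro i hiM hi1 fuel hfuel e
    obtain ⟨f, rfl⟩ : ∃ f, fuel = f + 1 := ⟨fuel - 1, by omega⟩
    have hne : pvPos c.length R i ≠ 0 := nt_pos_ne_zero hN hi1 (by omega)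
    have hneI : ((pvPos c.length R i : Nat) : Int) ≠ 0 := by exact_mod_cast hne
    rw [jumpLoopA, if_neg hneI]
    have hlt : pvPos c.length R i < c.length := Nat.mod_lt _ hN
    have hget : PySem.List.pyGetD c ((pvPos c.length R i : Nat) : Int) 0 = c.getD (pvPos c.length R i) 0 := by
      rw [PySem.List.pyGetD_natCast]
    rw [nt_step k hN hR i]
    rw [ih (i+1) (by omega) (by omega) f (by omega)]
    rw [List.range_succ_eq_map, List.map_cons, List.map_map, List.sum_cons]
    have harg : ∀ t : Nat, pvCost c (pvPos c.length R (i + Nat.succ t)) = pvCost c (pvPos c.length R (i + 1 + t)) := by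
      intro t; congr 2; omega
    simp only [Function.comp_def, harg, Nat.add_zero]
    rw [hget]
    unfold pvCost
    split_ifs <;> ring

lemma natAbs_pymod_lt (g b : Int) (hb : b ≠ 0) : (PySem.Int.mod g b).natAbs < b.natAbs := by
  rcases lt_or_gt_of_ne hb with h | h
  · have := PySem.Int.mod_neg_bounds g h
    omega
  · have h1 := PySem.Int.mod_nonneg g h
    have h2 := PySem.Int.mod_lt g h
    omega

lemma gcdLoopB_abs : ∀ (fuel : Nat) (g b : Int), b.natAbs < fuel →
    |gcdLoopB fuel g b| = (Int.gcd g b : Int) := by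
  intro fuel
  induction fuel with
  | zero => intro g b h; omega
  | succ f ih =>
    intro g b h
    by_cases hb : b = 0
    · rw [gcdLoopB, if_pos hb, hb, Int.gcd_zero_right, Int.abs_eq_natAbs]
    · rw [gcdLoopB, if_neg hb, ih b _ (by have := natAbs_pymod_lt g b hb; omega)]
      have hmod : PySem.Int.mod g b = g - PySem.Int.floordiv g b * b := by
        have := PySem.Int.floordiv_mul_add_mod g b; omega
      rw [hmod]
      norm_cast
      rw [Int.gcd_comm g b]
      exact Int.gcd_sub_mul_right_right b g (PySem.Int.floordiv g b)

lemma sum_cost (c : List Int) (l : List Nat) :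
    (l.map (pvCost c)).sum = 2 * (l.countP (fun p => decide (c.getD p 0 = 1)) : Int) + l.length := by
  induction l with
  | nil => simp
  | cons x xs ih =>
    rw [List.map_cons, List.sum_cons, List.countP_cons, List.length_cons, ih]
    unfold pvCost
    by_cases h : c.getD x 0 = 1
    · rw [if_pos h, if_pos (by simpa using h)]
      push_cast; ring
    · rw [if_neg h, if_neg (by simpa using h)]
      push_cast; ring

theorem jumping_main (c : List Int) (k : Int) (hc : c ≠ []) :
    jumping_on_clouds c k = jumping_on_clouds_alt c k := by
  have hN : 0 < c.length := List.length_pos_iff.mpr hc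
  have hNpos : (0:Int) < (c.length : Int) := by exact_mod_cast hN
  set N := c.length with hNdef
  set R : Nat := (k % (N:Int)).toNat with hRdef
  have hmodnn : 0 ≤ k % (N:Int) := Int.emod_nonneg k (by omega)
  have hR : (R : Int) = k % (N:Int) := Int.toNat_of_nonneg hmodnn
  have hRlt : R < N := by
    have := Int.emod_lt_of_pos k hNpos
    omega
  set G := N.gcd R with hGdef
  have hGpos : 0 < G := Nat.gcd_pos_of_pos_left R hN
  set M := N / G with hMdef
  have hMpos : 0 < M := Nat.div_pos (Nat.le_of_dvd hN (Nat.gcd_dvd_left N R)) hGpos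
  have hMG : M * G = N := Nat.div_mul_cancel (Nat.gcd_dvd_left N R)
  have hMleN : M ≤ N := Nat.div_le_self N G
  -- ===== A side =====
  have hstart : PySem.Int.mod (0 + k) (N:Int) = ((pvPos N R 1 : Nat) : Int) := by
    rw [zero_add, PySem.Int.mod_eq_emod_of_pos hNpos, ← hR]
    unfold pvPos
    rw [one_mul, Nat.mod_eq_of_lt hRlt]
  have hA : jumping_on_clouds c k =
      (if PySem.List.pyGetD c 0 0 = 1 then (97:Int) else 99)
        - ((List.range (M-1)).map (fun t => pvCost c (pvPos N R (1 + t)))).sum := by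
    show jumpLoopA c k (N:Int) N _ (PySem.Int.mod (0 + k) (N:Int)) = _
    rw [hstart, jumpLoopA_char c k hN hR (M-1) 1
      (by rw [← hNdef, ← hGdef, ← hMdef]; omega) (by omega) N
      (by omega)]
    split_ifs <;> ring
  -- full orbit sum
  have hpos0 : pvPos N R 0 = 0 := by unfold pvPos; simp
  have hsum : ((List.range M).map (fun t => pvCost c (pvPos N R t))).sum
      = pvCost c 0 + ((List.range (M-1)).map (fun t => pvCost c (pvPos N R (1 + t)))).sum := by
    conv_lhs => rw [show M = (M-1) + 1 by omega, List.range_succ_eq_map]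
    rw [List.map_cons, List.sum_cons, List.map_map, hpos0]
    simp only [Function.comp_def, Nat.succ_eq_one_add]
  have hA2 : jumping_on_clouds c k = 100 - ((List.range M).map (fun t => pvCost c (pvPos N R t))).sum := by
    rw [hA, hsum]
    rw [PySem.List.pyGetD_zero]
    unfold pvCost
    split_ifs <;> ring
  -- permutation to multiples
  have hperm := nt_perm (R := R) hN
  have hA3 : jumping_on_clouds c k = 100 - ((List.range M).map (fun j => pvCost c (j * G))).sum := by
    rw [hA2]
    congr 1
    have := (hperm.map (pvCost c)).sum_eq
    simp only [List.map_map, Function.comp_def] at this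
    exact this
  -- ===== B side =====
  have hgcd : |gcdLoopB (k.natAbs + 1) (N:Int) k| = (G : Int) := by
    rw [gcdLoopB_abs (k.natAbs + 1) _ k (by omega)]
    congr 1
    have h1 : Int.gcd (N:Int) k = Int.gcd (N:Int) (k % (N:Int)) := by
      rw [Int.emod_def, ← Int.gcd_sub_mul_right_right (N:Int) k ((k / (N:Int)))]
      ring_nf
    rw [h1, ← hR]
    simp [Int.gcd_natCast_natCast, hGdef]
  have hfloor : PySem.Int.floordiv (N:Int) (G:Int) = (M : Int) := by
    rw [PySem.Int.floordiv_natCast]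
  have hGIpos : (0:Int) < (G:Int) := by exact_mod_cast hGpos
  have hcount : (((N:Int) - 0 + G - 1) / (G:Int)).toNat = M := by
    have h1 : ((N:Int) - 0 + G - 1) = ((G:Int) - 1) + M * G := by
      push_cast [← hMG]
      ring
    rw [h1, Int.add_mul_ediv_right _ _ (by omega), Int.ediv_eq_zero_of_lt (by omega) (by omega)]
    omega
  have hrange : PySem.List.pyRange 0 (N:Int) (G:Int)
      = (List.range M).map (fun j : Nat => ((0:Int) + (G:Int) * (j:Int))) := by
    rw [PySem.List.pyRange_of_pos 0 (N:Int) hGIpos]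
    rw [if_pos (by omega), hcount]
  have hB : jumping_on_clouds_alt c k
      = 100 - (M:Int) - 2 * ((List.range M).countP (fun j => decide (c.getD (j * G) 0 = 1)) : Int) := by
    show 100 - PySem.Int.floordiv (N:Int) (|gcdLoopB (k.natAbs + 1) (N:Int) k|)
        - 2 * ((PySem.List.pyRange 0 (N:Int) (|gcdLoopB (k.natAbs + 1) (N:Int) k|)).foldl
            (fun acc i => if PySem.List.pyGetD c i 0 = 1 then acc + 1 else acc) (0 : Int)) = _
    rw [hgcd, hfloor, hrange]
    rw [PySem.List.foldl_ite_add_one (fun i => PySem.List.pyGetD c i 0 = 1)]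
    rw [List.countP_map]
    rw [zero_add]
    have hpred : ((fun x => decide (PySem.List.pyGetD c x 0 = 1)) ∘ fun j : Nat => (0:Int) + (G:Int) * (j:Int))
        = (fun j : Nat => decide (c.getD (j * G) 0 = 1)) := by
      funext j
      simp only [Function.comp_def]
      have harg : ((0:Int) + (G:Int) * (j:Int)) = ((j * G : Nat) : Int) := by push_cast; ring
      rw [harg, PySem.List.pyGetD_natCast]
    rw [hpred]
  -- ===== combine =====
  rw [hA3, hB]
  have hs := sum_cost c ((List.range M).map (fun j => j * G))
  simp only [List.map_map, Function.comp_def, List.countP_map, List.length_map, List.length_range] at hs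
  rw [hs]
  ring

-- ===== VERDICT (by name: the statement is the Claim_ definition above) =====
theorem jumping_on_clouds_spec : Claim_equal_jumping_on_clouds := by
  intro c k _ hpre
  unfold Spec_jumping_on_clouds
  exact jumping_main c k hpre
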